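-- pv_equiv track=rewrite | github.com/jayellho/algo-design-manual | 3_data-structures/interview_problems/3-41.py | find_string
-- ===== SOURCE A (Python) =====
-- import collections
--
-- def find_string(s:str, magazine: str) -> bool:
--
--     # define vars.
--     freq_magazine = collections.Counter(magazine)
--
--     # edge case: len of s > len of magazine.
--     if len(s) > len(magazine):
--         return False
--
--     # iterate.
--     for c in s:
--         if c not in freq_magazine or freq_magazine[c] - 1 < 0:
--             return False
--
--         freq_magazine[c] -= 1
--
--     return True
-- ===== SOURCE B (Python) =====
-- import collections
--
-- def find_string(s: str, magazine: str) -> bool: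
--     # s is coverable iff the multiset difference Counter(s) - Counter(magazine)
--     # (which keeps only positive residuals) is empty.
--     return not (collections.Counter(s) - collections.Counter(magazine))
-- ===== Notes on version B (the rewrite author's own statement) =====
-- stated objective: simpler
-- what changed: Replaced the length guard plus per-character decrement-and-early-exit loop over a mutable counter with a single whole-multiset comparison: Counter(s) - Counter(magazine) keeps only positive residuals, so emptiness of the difference is the answer.
import Mathlib
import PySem

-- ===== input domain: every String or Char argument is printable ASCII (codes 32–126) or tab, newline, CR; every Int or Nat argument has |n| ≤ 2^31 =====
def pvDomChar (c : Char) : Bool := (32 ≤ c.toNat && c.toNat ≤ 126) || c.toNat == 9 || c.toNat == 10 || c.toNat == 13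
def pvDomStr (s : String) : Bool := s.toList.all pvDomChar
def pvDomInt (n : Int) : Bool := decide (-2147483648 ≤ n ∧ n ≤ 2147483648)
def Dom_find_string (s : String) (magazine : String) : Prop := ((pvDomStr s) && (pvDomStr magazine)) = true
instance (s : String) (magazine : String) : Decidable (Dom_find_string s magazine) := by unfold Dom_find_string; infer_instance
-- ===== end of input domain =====

-- B replaces A's length guard and per-character decrement/early-exit scan by one
-- whole-multiset comparison (emptiness of the Counter difference); objective: simpler.

-- ===== PORT A =====
-- the 'for c in s' loop with its early returns
def find_string_loop (d : PySem.Dict Char Int) (cs : List Char) : Bool :=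
  match cs with
  | [] => true
  | c :: rest =>
      if !(d.contains c) || d.getD c 0 - 1 < 0 then false
      else find_string_loop (d.modify c 0 (· - 1)) rest

def find_string (s : String) (magazine : String) : Bool :=
  let freq_magazine := PySem.Dict.counter magazine.toList
  if PySem.Str.len s > PySem.Str.len magazine then false
  else find_string_loop freq_magazine s.toList

-- ===== PORT B =====
-- Counter '-' keeps, for each key of the left counter, the residual count when positive;
-- (counter values are ≥ 1, so the right counter contributes no keys of its own)
def find_string_alt (s : String) (magazine : String) : Bool :=
  let cs := PySem.Dict.counter s.toList
  let cm := PySem.Dict.counter magazine.toList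
  let diff := cs.items.filterMap (fun p =>
    if p.2 - cm.getD p.1 0 > 0 then some (p.1, p.2 - cm.getD p.1 0) else none)
  diff.isEmpty

-- ===== PRECONDITION & SPEC =====
def Spec_find_string (s : String) (magazine : String) (out : Bool) : Prop := out = find_string_alt s magazine
instance (s : String) (magazine : String) (out : Bool) : Decidable (Spec_find_string s magazine out) := by unfold Spec_find_string; infer_instance

-- ===== CLAIM (what is proved, stated in full; the proofs are below) =====
def Claim_equal_find_string : Prop := ∀ (s : String) (magazine : String), Dom_find_string s magazine → Spec_find_string s magazine (find_string s magazine)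

-- ===== LEMMAS AND PROOFS =====

-- decrementing fold used to state the loop invariant
def decAll (used : List Char) (d : PySem.Dict Char Int) : PySem.Dict Char Int :=
  used.foldl (fun d c => d.modify c 0 (· - 1)) d

lemma getD_decAll (used : List Char) (d : PySem.Dict Char Int) (v : Char) :
    (decAll used d).getD v 0 = d.getD v 0 - used.count v := by
  induction used generalizing d with
  | nil => simp [decAll]
  | cons c rest ih =>
      simp only [decAll, List.foldl_cons] at *
      rw [ih]
      rw [PySem.Dict.getD_modify]
      by_cases h : v = c
      · subst h; simp; omega
      · simp [h, Ne.symm h]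

lemma contains_decAll (used : List Char) (d : PySem.Dict Char Int) (v : Char) :
    (decAll used d).contains v = (decide (v ∈ used) || d.contains v) := by
  induction used generalizing d with
  | nil => simp [decAll]
  | cons c rest ih =>
      simp only [decAll, List.foldl_cons] at *
      rw [ih, PySem.Dict.contains_modify]
      by_cases h : v = c
      · subst h; simp
      · have hb : (v == c) = false := by simp [h]
        simp [h, hb]

lemma decAll_snoc (used : List Char) (c : Char) (d : PySem.Dict Char Int) :
    decAll (used ++ [c]) d = (decAll used d).modify c 0 (· - 1) := by
  simp [decAll]

lemma loop_iff (mag : List Char) : ∀ (cs used : List Char),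
    find_string_loop (decAll used (PySem.Dict.counter mag)) cs
      = decide (∀ c ∈ cs, used.count c + cs.count c ≤ mag.count c) := by
  intro cs
  induction cs with
  | nil => intro used; simp [find_string_loop]
  | cons c rest ih =>
      intro used
      rw [find_string_loop]
      rw [contains_decAll, getD_decAll, PySem.Dict.getD_counter, PySem.Dict.contains_counter]
      simp only [List.contains_eq_mem]
      by_cases hguard : (!(decide (c ∈ used) || decide (c ∈ mag)) || ((mag.count c : Int) - used.count c - 1 < 0)) = true
      · rw [if_pos hguard]
        rcases Bool.or_eq_true_iff.mp hguard with h | h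
        · -- c neither in used nor in mag: mag.count c = 0
          simp only [Bool.not_eq_eq_eq_not, Bool.not_true, Bool.or_eq_false_iff,
            decide_eq_false_iff_not] at h
          have hc : mag.count c = 0 := List.count_eq_zero.mpr h.2
          symm; simp only [decide_eq_false_iff_not]
          intro hall
          have := hall c (by simp)
          rw [hc, List.count_cons_self] at this
          omega
        · -- remaining budget for c already exhausted
          have h' : (mag.count c : Int) - used.count c - 1 < 0 := by exact_mod_cast of_decide_eq_true h
          symm; simp only [decide_eq_false_iff_not]
          intro hall
          have := hall c (by simp)
          rw [List.count_cons_self] at this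
          omega
      · rw [if_neg hguard]
        rw [Bool.not_eq_true, Bool.or_eq_false_iff] at hguard
        have h2 := of_decide_eq_false hguard.2
        rw [← decAll_snoc, ih (used ++ [c])]
        apply decide_eq_decide.mpr
        have hbudgetN : used.count c + 1 ≤ mag.count c := by omega
        constructor
        · intro hall x hx
          rcases List.mem_cons.mp hx with rfl | hx'
          · by_cases hcr : x ∈ rest
            · have := hall x hcr
              simp [List.count_append] at this
              simp [List.count_cons_self]
              omega
            · have h0 : rest.count x = 0 := List.count_eq_zero.mpr hcr
              simp [List.count_cons_self, h0]
              omega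
          · have := hall x hx'
            by_cases hxeq : x = c
            · subst hxeq
              simp [List.count_append] at this
              simp [List.count_cons_self]
              omega
            · simp [List.count_append, Ne.symm hxeq] at this
              simp [Ne.symm hxeq]
              omega
        · intro hall x hx
          have := hall x (List.mem_cons_of_mem c hx)
          by_cases hxeq : x = c
          · subst hxeq
            simp [List.count_cons_self] at this
            simp [List.count_append]
            omega
          · simp [Ne.symm hxeq] at this
            simp [List.count_append, Ne.symm hxeq]
            omega

lemma alt_iff (s magazine : String) :
    find_string_alt s magazine
      = decide (∀ c ∈ s.toList, s.toList.count c ≤ magazine.toList.count c) := by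
  unfold find_string_alt
  rw [Bool.eq_iff_iff, List.isEmpty_iff, List.filterMap_eq_nil_iff, decide_eq_true_iff]
  simp only [PySem.Dict.items_counter, List.mem_map, PySem.Dict.getD_counter]
  constructor
  · intro h c hc
    have := h (c, (s.toList.count c : Int)) ⟨c, (PySem.Set.mem_ofList _ _).mpr hc, rfl⟩
    by_contra hlt
    rw [if_pos (by push_cast; omega)] at this
    exact Option.some_ne_none _ this
  · intro h a ha
    obtain ⟨k, hk, rfl⟩ := ha
    rw [if_neg]
    have := h k ((PySem.Set.mem_ofList _ _).mp hk)
    push_cast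
    omega

lemma len_contra (s magazine : String)
    (h : ∀ c ∈ s.toList, s.toList.count c ≤ magazine.toList.count c) :
    s.toList.length ≤ magazine.toList.length :=
  (List.subperm_ext_iff.mpr h).length_le

-- ===== VERDICT (by name: the statement is the Claim_ definition above) =====
theorem find_string_spec : Claim_equal_find_string := by
  intro s magazine _
  unfold Spec_find_string
  unfold find_string
  rw [alt_iff]
  by_cases hlen : PySem.Str.len s > PySem.Str.len magazine
  · rw [if_pos hlen]
    symm
    simp only [decide_eq_false_iff_not]
    intro hall
    have h2 := len_contra s magazine hall
    have hlen' : (magazine.toList.length : Int) < s.toList.length := by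
      simpa [PySem.Str.len] using hlen
    omega
  · rw [if_neg hlen]
    have := loop_iff magazine.toList s.toList []
    simpa [decAll] using this
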